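-- pv_equiv track=rewrite | github.com/jpawlowski/hass.tibber_prices | custom_components/tibber_prices/utils/price.py | _build_rating_blocks
-- ===== SOURCE A (Python) =====
-- from typing import TYPE_CHECKING, Any
--
-- def _build_rating_blocks(
--     rated_intervals: list[tuple[int, dict[str, Any], str]],
-- ) -> list[tuple[int, int, str, int]]:
--     """
--     Build list of contiguous rating blocks from rated intervals.
--
--     Args:
--         rated_intervals: List of (original_idx, interval_dict, rating) tuples
--
--     Returns:
--         List of (start_idx, end_idx, rating, length) tuples where indices
--         refer to positions in rated_intervals
--
--     """
--     blocks: list[tuple[int, int, str, int]] = []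
--     if not rated_intervals:
--         return blocks
--
--     block_start = 0
--     current_rating = rated_intervals[0][2]
--
--     for idx in range(1, len(rated_intervals)):
--         if rated_intervals[idx][2] != current_rating:
--             # End current block
--             blocks.append((block_start, idx - 1, current_rating, idx - block_start))
--             block_start = idx
--             current_rating = rated_intervals[idx][2]
--
--     # Don't forget the last block
--     blocks.append((block_start, len(rated_intervals) - 1, current_rating, len(rated_intervals) - block_start))
--     return blocks
-- ===== SOURCE B (Python) =====
-- def _build_rating_blocks(
--     rated_intervals: list,
-- ) -> list:
--     # Staged passes: first compute the list of block boundary indices, then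
--     # pair consecutive boundaries into (start, end, rating, length) blocks.
--     n = len(rated_intervals)
--     if n == 0:
--         return []
--     cuts = [i for i in range(1, n) if rated_intervals[i][2] != rated_intervals[i - 1][2]]
--     bounds = [0] + cuts + [n]
--     return [
--         (s, e - 1, rated_intervals[s][2], e - s)
--         for s, e in zip(bounds, bounds[1:])
--     ]
-- ===== Notes on version B (the rewrite author's own statement) =====
-- stated objective: alternative
-- what changed: Replaces A's stateful single pass (carrying block_start/current_rating and emitting blocks at each change) by two staged passes: first a comprehension collecting the boundary indices where the rating changes, then zipping consecutive boundaries into blocks.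
import Mathlib
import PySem

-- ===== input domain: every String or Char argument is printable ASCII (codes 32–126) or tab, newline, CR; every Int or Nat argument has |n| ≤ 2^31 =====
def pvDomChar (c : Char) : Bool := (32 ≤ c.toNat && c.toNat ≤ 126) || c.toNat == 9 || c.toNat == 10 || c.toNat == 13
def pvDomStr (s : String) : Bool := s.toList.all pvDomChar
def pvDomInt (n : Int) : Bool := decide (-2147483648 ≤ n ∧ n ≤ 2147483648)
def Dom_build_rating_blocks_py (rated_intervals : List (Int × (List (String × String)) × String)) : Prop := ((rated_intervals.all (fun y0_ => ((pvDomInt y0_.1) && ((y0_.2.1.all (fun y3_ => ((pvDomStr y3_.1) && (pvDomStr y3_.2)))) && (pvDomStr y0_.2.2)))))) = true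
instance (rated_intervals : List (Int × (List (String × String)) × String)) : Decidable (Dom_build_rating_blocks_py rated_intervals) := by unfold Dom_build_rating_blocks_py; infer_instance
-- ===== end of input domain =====

-- B replaces A's stateful single-pass boundary loop by two staged passes: collect the list of
-- change-boundary indices, then pair consecutive boundaries into blocks — alternative, same O(n) cost.


-- ===== PORT A =====
-- literal port of A: empty check, then a loop over range(1, len(rated_intervals)) carrying
-- (blocks, block_start, current_rating), then the final block appended.
def build_rating_blocks_py (rated_intervals : List (Int × (List (String × String)) × String)) : List (Int × Int × String × Int) :=
  if rated_intervals = [] then []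
  else
    let n : Int := rated_intervals.length
    let cr0 : String := (((PySem.List.pyGet? rated_intervals 0).map (·.2.2)).getD "")
    let st := (PySem.List.pyRange 1 n 1).foldl
      (fun (acc : List (Int × Int × String × Int) × Int × String) idx =>
        let r : String := (((PySem.List.pyGet? rated_intervals idx).map (·.2.2)).getD "")
        if r ≠ acc.2.2 then
          (acc.1 ++ [(acc.2.1, idx - 1, acc.2.2, idx - acc.2.1)], idx, r)
        else acc)
      ([], 0, cr0)
    st.1 ++ [(st.2.1, n - 1, st.2.2, n - st.2.1)]

-- ===== PORT B =====
-- B-side helper: rated_intervals[i][2] via Python indexing (shared subexpression of Source B).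
def pvRating (xs : List (Int × (List (String × String)) × String)) (i : Int) : String :=
  (((PySem.List.pyGet? xs i).map (·.2.2)).getD "")

-- port of B: comprehension collecting change boundaries, then zip of consecutive boundaries.
def build_rating_blocks_py_alt (rated_intervals : List (Int × (List (String × String)) × String)) : List (Int × Int × String × Int) :=
  let n : Int := rated_intervals.length
  if rated_intervals.length = 0 then []
  else
    let cuts := (PySem.List.pyRange 1 n 1).filter
      (fun i => pvRating rated_intervals i != pvRating rated_intervals (i - 1))
    let bounds : List Int := 0 :: (cuts ++ [n])
    (bounds.zip bounds.tail).map (fun p => (p.1, p.2 - 1, pvRating rated_intervals p.1, p.2 - p.1))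

-- ===== PRECONDITION & SPEC =====
def Spec_build_rating_blocks_py (rated_intervals : List (Int × (List (String × String)) × String)) (out : List (Int × Int × String × Int)) : Prop := out = build_rating_blocks_py_alt rated_intervals
instance (rated_intervals : List (Int × (List (String × String)) × String)) (out : List (Int × Int × String × Int)) : Decidable (Spec_build_rating_blocks_py rated_intervals out) := by unfold Spec_build_rating_blocks_py; infer_instance

-- ===== CLAIM (what is proved, stated in full; the proofs are below) =====
def Claim_equal_build_rating_blocks_py : Prop := ∀ (rated_intervals : List (Int × (List (String × String)) × String)), Dom_build_rating_blocks_py rated_intervals → Spec_build_rating_blocks_py rated_intervals (build_rating_blocks_py rated_intervals)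

-- ===== LEMMAS AND PROOFS =====

-- reference function: A's remaining loop (from position i, open block (bs, cr)) expressed
-- structurally on the suffix of the list.
def pvF (i bs : Int) (cr : String) : List (Int × (List (String × String)) × String) → List (Int × Int × String × Int)
  | [] => [(bs, i - 1, cr, i - bs)]
  | x :: rest =>
    if x.2.2 ≠ cr then (bs, i - 1, cr, i - bs) :: pvF (i + 1) i x.2.2 rest
    else pvF (i + 1) bs cr rest

-- structural form of B's boundary comprehension on a suffix, carrying the previous rating.
def pvCuts (i : Int) (prev : String) : List (Int × (List (String × String)) × String) → List Int
  | [] => []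
  | x :: rest => if x.2.2 ≠ prev then i :: pvCuts (i + 1) x.2.2 rest else pvCuts (i + 1) x.2.2 rest

-- structural form of B's zip-of-consecutive-boundaries pass.
def pvPairs (f : Int → Int → (Int × Int × String × Int)) : List Int → List (Int × Int × String × Int)
  | a :: b :: t => f a b :: pvPairs f (b :: t)
  | _ => []

theorem zip_tail_eq_pvPairs (xs : List (Int × (List (String × String)) × String)) :
    ∀ (l : List Int) (a : Int),
      ((a :: l).zip l).map (fun p => (p.1, p.2 - 1, pvRating xs p.1, p.2 - p.1))
        = pvPairs (fun s e => (s, e - 1, pvRating xs s, e - s)) (a :: l)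
  | [], _ => rfl
  | b :: t, a => by
    simp only [List.zip_cons_cons, List.map_cons, pvPairs]
    rw [zip_tail_eq_pvPairs xs t b]

-- peel A's loop over range(i, n) into pvF on the suffix drop i.
theorem pvLoopA (xs : List (Int × (List (String × String)) × String)) :
    ∀ (suffix : List (Int × (List (String × String)) × String)) (i : Nat)
      (blocks : List (Int × Int × String × Int)) (bs : Int) (cr : String),
      xs.drop i = suffix → i ≤ xs.length →
      (let st := (PySem.List.pyRange (i : Int) (xs.length : Int) 1).foldl
        (fun (acc : List (Int × Int × String × Int) × Int × String) idx =>
          let r : String := (((PySem.List.pyGet? xs idx).map (·.2.2)).getD "")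
          if r ≠ acc.2.2 then
            (acc.1 ++ [(acc.2.1, idx - 1, acc.2.2, idx - acc.2.1)], idx, r)
          else acc)
        (blocks, bs, cr)
       st.1 ++ [(st.2.1, (xs.length : Int) - 1, st.2.2, (xs.length : Int) - st.2.1)])
      = blocks ++ pvF (i : Int) bs cr suffix
  | [], i, blocks, bs, cr, hdrop, hle => by
    have hlen := congrArg List.length hdrop
    simp only [List.length_drop, List.length_nil] at hlen
    have hi : i = xs.length := by omega
    subst hi
    simp [pvF]
  | x :: suffix, i, blocks, bs, cr, hdrop, hle => by
    have hlen := congrArg List.length hdrop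
    simp only [List.length_drop, List.length_cons] at hlen
    have hlt : i < xs.length := by omega
    have hget : PySem.List.pyGet? xs (i : Int) = some x := by
      rw [PySem.List.pyGet?_natCast]
      rw [← List.head?_drop, hdrop]; rfl
    have hrange : PySem.List.pyRange (i : Int) (xs.length : Int) 1
        = (i : Int) :: PySem.List.pyRange ((i : Int) + 1) (xs.length : Int) 1 := by
      apply PySem.List.pyRange_one_cons
      exact_mod_cast hlt
    have hdrop' : xs.drop (i + 1) = suffix := by
      rw [← List.tail_drop, hdrop]; rfl
    have hcast : ((i : Int) + 1) = ((i + 1 : Nat) : Int) := by push_cast; ring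
    simp only [hrange, List.foldl_cons, hget, Option.map_some, Option.getD_some]
    by_cases h : x.2.2 = cr
    · have ih' := pvLoopA xs suffix (i + 1) blocks bs cr hdrop' (by omega)
      simp only [h, ne_eq, not_true_eq_false, if_false]
      simp only [pvF, h, ne_eq, not_true_eq_false, if_false]
      rw [hcast]
      exact ih'
    · have ih' := pvLoopA xs suffix (i + 1) (blocks ++ [(bs, (i : Int) - 1, cr, (i : Int) - bs)]) (i : Int) x.2.2 hdrop' (by omega)
      simp only [ne_eq, h, not_false_eq_true, if_pos]
      simp only [pvF, ne_eq, h, not_false_eq_true, if_pos]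
      rw [hcast]
      rw [ih']
      simp
termination_by suffix => suffix.length

-- peel B's filtered range into pvCuts on the suffix drop i.
theorem pvCutsPeel (xs : List (Int × (List (String × String)) × String)) :
    ∀ (suffix : List (Int × (List (String × String)) × String)) (i : Nat) (prev : String),
      xs.drop i = suffix → 1 ≤ i →
      pvRating xs ((i : Int) - 1) = prev →
      (PySem.List.pyRange (i : Int) (xs.length : Int) 1).filter
        (fun j => pvRating xs j != pvRating xs (j - 1)) = pvCuts (i : Int) prev suffix
  | [], i, prev, hdrop, _, _ => by
    have hlen := congrArg List.length hdrop
    simp only [List.length_drop, List.length_nil] at hlen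
    have : PySem.List.pyRange (i : Int) (xs.length : Int) 1 = [] := by
      simp [PySem.List.pyRange]
      omega
    simp [this, pvCuts]
  | x :: suffix, i, prev, hdrop, h1, hprev => by
    have hlen := congrArg List.length hdrop
    simp only [List.length_drop, List.length_cons] at hlen
    have hlt : i < xs.length := by omega
    have hget : PySem.List.pyGet? xs (i : Int) = some x := by
      rw [PySem.List.pyGet?_natCast]
      rw [← List.head?_drop, hdrop]; rfl
    have hrat : pvRating xs (i : Int) = x.2.2 := by
      simp [pvRating, hget]
    have hrange : PySem.List.pyRange (i : Int) (xs.length : Int) 1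
        = (i : Int) :: PySem.List.pyRange ((i : Int) + 1) (xs.length : Int) 1 := by
      apply PySem.List.pyRange_one_cons
      exact_mod_cast hlt
    have hdrop' : xs.drop (i + 1) = suffix := by
      rw [← List.tail_drop, hdrop]; rfl
    have hcast : ((i : Int) + 1) = ((i + 1 : Nat) : Int) := by push_cast; ring
    have hprev' : pvRating xs (((i + 1 : Nat) : Int) - 1) = x.2.2 := by
      rw [← hcast]; simpa using hrat
    have ih := pvCutsPeel xs suffix (i + 1) x.2.2 hdrop' (by omega) hprev'
    rw [hrange]
    simp only [List.filter_cons, hrat, hprev]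
    by_cases h : x.2.2 = prev
    · have hb : (x.2.2 != prev) = false := by simp [h]
      rw [hb, if_neg (by simp), pvCuts, if_neg (by simp [h]), hcast, ih]
    · have hb : (x.2.2 != prev) = true := by simpa using h
      simp only [hb, pvCuts, ne_eq, h, not_false_eq_true, if_pos, hcast, ih]
termination_by suffix => suffix.length

-- A's remaining loop equals B's pairing of boundaries, on every suffix.
theorem pvF_eq_pairs (xs : List (Int × (List (String × String)) × String)) :
    ∀ (suffix : List (Int × (List (String × String)) × String)) (i : Nat) (bs : Int) (cr : String),
      xs.drop i = suffix → i ≤ xs.length → pvRating xs bs = cr →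
      pvF (i : Int) bs cr suffix
        = pvPairs (fun s e => (s, e - 1, pvRating xs s, e - s))
            (bs :: (pvCuts (i : Int) cr suffix ++ [(xs.length : Int)]))
  | [], i, bs, cr, hdrop, hle, hbs => by
    have hlen := congrArg List.length hdrop
    simp only [List.length_drop, List.length_nil] at hlen
    have hi : i = xs.length := by omega
    subst hi
    simp [pvF, pvCuts, pvPairs, hbs]
  | x :: suffix, i, bs, cr, hdrop, hle, hbs => by
    have hlen := congrArg List.length hdrop
    simp only [List.length_drop, List.length_cons] at hlen
    have hlt : i < xs.length := by omega
    have hget : PySem.List.pyGet? xs (i : Int) = some x := by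
      rw [PySem.List.pyGet?_natCast]
      rw [← List.head?_drop, hdrop]; rfl
    have hrat : pvRating xs (i : Int) = x.2.2 := by
      simp [pvRating, hget]
    have hdrop' : xs.drop (i + 1) = suffix := by
      rw [← List.tail_drop, hdrop]; rfl
    have hcast : ((i : Int) + 1) = ((i + 1 : Nat) : Int) := by push_cast; ring
    by_cases h : x.2.2 = cr
    · have ih := pvF_eq_pairs xs suffix (i + 1) bs cr hdrop' (by omega) hbs
      simp only [pvF, pvCuts, h, ne_eq, not_true_eq_false, if_false, hcast]
      exact ih
    · have ih := pvF_eq_pairs xs suffix (i + 1) (i : Int) x.2.2 hdrop' (by omega) hrat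
      simp only [pvF, pvCuts, ne_eq, h, not_false_eq_true, if_pos, hcast]
      rw [ih]
      simp only [pvPairs, List.cons_append, hbs]
termination_by suffix => suffix.length

-- ===== VERDICT (by name: the statement is the Claim_ definition above) =====
theorem build_rating_blocks_py_spec : Claim_equal_build_rating_blocks_py := by
  intro xs _
  unfold Spec_build_rating_blocks_py build_rating_blocks_py build_rating_blocks_py_alt
  match xs with
  | [] => simp
  | x :: rest =>
    have hne : (x :: rest : List (Int × (List (String × String)) × String)) ≠ [] := List.cons_ne_nil x rest
    have hlen : (x :: rest : List (Int × (List (String × String)) × String)).length ≠ 0 := by simp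
    simp only [if_neg hne, if_neg hlen]
    have h0 : pvRating (x :: rest) 0 = x.2.2 := by
      simp [pvRating]
    have hA := pvLoopA (x :: rest) rest 1 [] 0 x.2.2 rfl (by simp)
    simp only [Nat.cast_one] at hA
    have hcr0 : (((PySem.List.pyGet? (x :: rest) 0).map (·.2.2)).getD "") = x.2.2 := by
      simpa [pvRating] using h0
    simp only [hcr0]
    rw [hA]
    have hcuts := pvCutsPeel (x :: rest) rest 1 x.2.2 rfl (le_refl 1) (by simpa using h0)
    simp only [Nat.cast_one] at hcuts
    rw [hcuts]
    simp only [List.tail_cons]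
    rw [zip_tail_eq_pvPairs (x :: rest)]
    have hF := pvF_eq_pairs (x :: rest) rest 1 0 x.2.2 rfl (by simp) h0
    simp only [Nat.cast_one] at hF
    simpa using hF
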